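-- pv_equiv track=rewrite | github.com/jungmannlab/picasso | picasso/design.py | convertPlateIndex
-- ===== SOURCE A (Python) =====
-- def convertPlateIndex(plate: list, platename: str) -> list:
--     """Convert plate index from canvas index format to a structured
--     format for ordering the sequences.
--
--     Parameters
--     ----------
--     plate : list
--         List of lists containing plate information in canvas index
--         format.
--     platename : str
--         Name of the plate to be used in the output.
--
--     Returns
--     -------
--     newplate : list
--         List of lists containing the plate information in a structured
--         format for ordering the sequences.
--     """
--     # convert from canvas index [CANVAS_INDEX, OLIGONAME, SEQUENCE]
--     # format for ordering [PLATE NAME, PLATE POSITION, OLIGONAME, SEQUENCE]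
--     platerow = [
--         "A",
--         "B",
--         "C",
--         "D",
--         "E",
--         "F",
--         "G",
--         "H",
--         "A",
--         "B",
--         "C",
--         "D",
--         "E",
--         "F",
--         "G",
--         "H",
--     ]
--     platecol = [1, 2, 3, 4, 5, 6, 7, 8, 9, 10, 11, 12]
--     structurerow = [
--         "A",
--         "B",
--         "C",
--         "D",
--         "E",
--         "F",
--         "G",
--         "H",
--         "I",
--         "J",
--         "K",
--         "L",
--         "M",
--         "N",
--         "O",
--         "P",
--     ]
--     structurecol = [1, 2, 3, 4, 5, 6, 7, 8, 9, 10, 11, 12]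
--
--     newplate = [["PLATE NAME", "PLATE POSITION", "OLIGO NAME", "SEQUENCE"]]
--     for row in range(0, len(platerow)):
--         for col in range(0, len(platecol)):
--             if row < 8:
--                 platenameindex = platename + "_1"
--             else:
--                 platenameindex = platename + "_2"
--             structureindex = structurerow[row] + str(structurecol[col])
--             oligoname = " "
--             sequence = " "
--             for i in range(0, len(plate)):
--                 if plate[i][0] == structureindex:
--                     oligoname = plate[i][1]
--                     sequence = plate[i][2]
--             newplate.append(
--                 [
--                     platenameindex,
--                     platerow[row] + str(platecol[col]),
--                     oligoname,
--                     sequence,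
--                 ]
--             )
--
--     return newplate
-- ===== SOURCE B (Python) =====
-- def convertPlateIndex(plate: list, platename: str) -> list:
--     # Scatter instead of gather: preallocate the 192 default output rows together with a
--     # key -> slot-index map (one pass over the fixed grid), then one pass over
--     # `plate` writes each entry into its slot (later entries overwrite earlier,
--     # matching the original's last-match-wins behaviour).
--     rows16 = ["A", "B", "C", "D", "E", "F", "G", "H",
--               "I", "J", "K", "L", "M", "N", "O", "P"]
--     out = [["PLATE NAME", "PLATE POSITION", "OLIGO NAME", "SEQUENCE"]]
--     slot = {}
--     for i in range(192):
--         r = i // 12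
--         c = i % 12 + 1
--         out.append([platename + ("_1" if r < 8 else "_2"),
--                     rows16[r % 8] + str(c), " ", " "])
--         slot[rows16[r] + str(c)] = i + 1
--     for e in plate:
--         j = slot.get(e[0])
--         if j is not None:
--             out[j] = out[j][:2] + [e[1], e[2]]
--     return out
-- ===== Notes on version B (the rewrite author's own statement) =====
-- stated objective: alternative
-- what changed: A rescans the whole plate once per each of the 192 output wells (gather, last match wins); B inverts the loop structure: it preallocates the 192 default output rows plus a key-to-slot-index map over the fixed grid, then a single pass over the plate scatters each entry into its slot (later entries overwrite earlier).
import Mathlib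
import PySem

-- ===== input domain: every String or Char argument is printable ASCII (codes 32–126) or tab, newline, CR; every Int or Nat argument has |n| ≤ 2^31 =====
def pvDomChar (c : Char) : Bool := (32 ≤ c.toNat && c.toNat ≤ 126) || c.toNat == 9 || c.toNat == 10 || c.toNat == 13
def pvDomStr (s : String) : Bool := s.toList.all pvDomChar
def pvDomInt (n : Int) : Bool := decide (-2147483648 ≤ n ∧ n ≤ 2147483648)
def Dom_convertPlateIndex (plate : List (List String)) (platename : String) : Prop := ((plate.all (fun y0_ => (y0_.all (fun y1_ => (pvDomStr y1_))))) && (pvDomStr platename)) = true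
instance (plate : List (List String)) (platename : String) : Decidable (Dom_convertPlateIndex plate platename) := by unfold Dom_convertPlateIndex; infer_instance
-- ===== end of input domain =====

-- B inverts A's loop structure (objective: alternative): instead of A's 192 rescans of
-- `plate` (one gather scan per output well), B preallocates the 192 default output rows
-- plus a key→slot-index map over the fixed grid, then one pass over `plate` scatters
-- each entry into its slot.

-- ===== PORT A =====
def convertPlateIndex (plate : List (List String)) (platename : String) : List (List String) :=
  let platerow : List String := ["A","B","C","D","E","F","G","H","A","B","C","D","E","F","G","H"]
  let platecol : List Int := [1,2,3,4,5,6,7,8,9,10,11,12]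
  let structurerow : List String := ["A","B","C","D","E","F","G","H","I","J","K","L","M","N","O","P"]
  let structurecol : List Int := [1,2,3,4,5,6,7,8,9,10,11,12]
  let newplate : List (List String) := [["PLATE NAME","PLATE POSITION","OLIGO NAME","SEQUENCE"]]
  (PySem.List.pyRange 0 (PySem.List.len platerow) 1).foldl (fun newplate row =>
    (PySem.List.pyRange 0 (PySem.List.len platecol) 1).foldl (fun newplate col =>
      let platenameindex := if row < 8 then platename ++ "_1" else platename ++ "_2"
      let structureindex := PySem.List.pyGetD structurerow row "" ++ PySem.Int.toStr (PySem.List.pyGetD structurecol col 0)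
      let os := (PySem.List.pyRange 0 (PySem.List.len plate) 1).foldl
        (fun (os : String × String) i =>
          if PySem.List.pyGetD (PySem.List.pyGetD plate i []) 0 "" == structureindex then
            (PySem.List.pyGetD (PySem.List.pyGetD plate i []) 1 "",
             PySem.List.pyGetD (PySem.List.pyGetD plate i []) 2 "")
          else os) (" ", " ")
      newplate ++ [[platenameindex,
                    PySem.List.pyGetD platerow row "" ++ PySem.Int.toStr (PySem.List.pyGetD platecol col 0),
                    os.1, os.2]]) newplate) newplate

-- ===== PORT B =====
-- `out[j] = out[j][:2] + [e[1], e[2]]` : j is a value of the slot map, always 1 ≤ j ≤ 192 < len(out),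
-- so the Python index is in range and the assignment is ported as List.set at j.
def convertPlateIndex_alt (plate : List (List String)) (platename : String) : List (List String) :=
  let rows16 : List String := ["A","B","C","D","E","F","G","H","I","J","K","L","M","N","O","P"]
  let st := (PySem.List.pyRange 0 192 1).foldl
    (fun (st : List (List String) × PySem.Dict String Int) i =>
      let r := PySem.Int.floordiv i 12
      let c := PySem.Int.mod i 12 + 1
      (st.1 ++ [[platename ++ (if r < 8 then "_1" else "_2"),
                 PySem.List.pyGetD rows16 (PySem.Int.mod r 8) "" ++ PySem.Int.toStr c, " ", " "]],
       st.2.insert (PySem.List.pyGetD rows16 r "" ++ PySem.Int.toStr c) (i + 1)))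
    ([["PLATE NAME","PLATE POSITION","OLIGO NAME","SEQUENCE"]], PySem.Dict.empty)
  plate.foldl (fun out e =>
    match st.2.get? (PySem.List.pyGetD e 0 "") with
    | some j => out.set j.toNat
        (PySem.List.slice (PySem.List.pyGetD out j []) none (some 2) ++
         [PySem.List.pyGetD e 1 "", PySem.List.pyGetD e 2 ""])
    | none => out) st.1

-- ===== PRECONDITION & SPEC =====
-- the 192 valid structure indices "A1".."P12"
def pvKeys : List String :=
  (["A","B","C","D","E","F","G","H","I","J","K","L","M","N","O","P"]).flatMap
    (fun r => (List.range 12).map (fun c => r ++ PySem.Int.toStr ((c : Int) + 1)))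

-- Pre_ excludes exactly the inputs on which Python A raises IndexError: an empty
-- inner row (plate[i][0]), or a row matching a structure index with fewer than 3 fields.
def Pre_convertPlateIndex (plate : List (List String)) (platename : String) : Prop :=
  ∀ e ∈ plate, e ≠ [] ∧ (PySem.List.pyGetD e 0 "" ∈ pvKeys → 3 ≤ e.length)
instance (plate : List (List String)) (platename : String) : Decidable (Pre_convertPlateIndex plate platename) := by unfold Pre_convertPlateIndex; infer_instance

def pvWitness_convertPlateIndex : List (List String) × String := ([["A1", "o", "s"]], "pl")

def Spec_convertPlateIndex (plate : List (List String)) (platename : String) (out : List (List String)) : Prop := out = convertPlateIndex_alt plate platename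
instance (plate : List (List String)) (platename : String) (out : List (List String)) : Decidable (Spec_convertPlateIndex plate platename out) := by unfold Spec_convertPlateIndex; infer_instance

-- ===== CLAIM (what is proved, stated in full; the proofs are below) =====
def Claim_equal_convertPlateIndex : Prop := ∀ (plate : List (List String)) (platename : String), Dom_convertPlateIndex plate platename → Pre_convertPlateIndex plate platename → Spec_convertPlateIndex plate platename (convertPlateIndex plate platename)

-- ===== LEMMAS AND PROOFS =====

def pvRows16 : List String := ["A","B","C","D","E","F","G","H","I","J","K","L","M","N","O","P"]
def pvHeader : List String := ["PLATE NAME","PLATE POSITION","OLIGO NAME","SEQUENCE"]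

-- the structure index of flat slot n (0 ≤ n < 192)
def pvKey (i : Int) : String :=
  PySem.List.pyGetD pvRows16 (PySem.Int.floordiv i 12) "" ++ PySem.Int.toStr (PySem.Int.mod i 12 + 1)

-- the slot map B builds (a closed term; written exactly as B's fold so it matches syntactically)
def pvSlot : PySem.Dict String Int :=
  (PySem.List.pyRange 0 192 1).foldl (fun d i =>
    d.insert (PySem.List.pyGetD (["A","B","C","D","E","F","G","H","I","J","K","L","M","N","O","P"] : List String) (PySem.Int.floordiv i 12) "" ++ PySem.Int.toStr (PySem.Int.mod i 12 + 1)) (i + 1)) PySem.Dict.empty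

-- B's scatter step
def pvScat (out : List (List String)) (e : List String) : List (List String) :=
  match pvSlot.get? (PySem.List.pyGetD e 0 "") with
  | some j => out.set j.toNat
      (PySem.List.slice (PySem.List.pyGetD out j []) none (some 2) ++
       [PySem.List.pyGetD e 1 "", PySem.List.pyGetD e 2 ""])
  | none => out

-- B's initial grid
def pvDefRow (platename : String) (n : Nat) : List String :=
  [platename ++ (if (n / 12 : Nat) < 8 then "_1" else "_2"),
   PySem.List.pyGetD pvRows16 (((n / 12) % 8 : Nat) : Int) "" ++ PySem.Int.toStr (((n % 12 : Nat) : Int) + 1),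
   " ", " "]
def pvRows0 (platename : String) : List (List String) :=
  pvHeader :: (List.range 192).map (pvDefRow platename)

-- last matching plate entry for a key (last match wins in both programs)
def pvLast (k : String) (plate : List (List String)) : Option (List String) :=
  (plate.filter (fun e => PySem.List.pyGetD e 0 "" == k)).getLast?

-- what A's inner gather loop and B's scatter both produce at slot n
def pvOS (k : String) (plate : List (List String)) : String × String :=
  (pvLast k plate).elim (" ", " ")
    (fun e => (PySem.List.pyGetD e 1 "", PySem.List.pyGetD e 2 ""))

set_option maxRecDepth 8192 in
lemma pv_slot_items : pvSlot.items = (List.range 192).map (fun (n : Nat) => (pvKey (n : Int), (n : Int) + 1)) := by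
  decide

set_option maxRecDepth 8192 in
lemma pv_key_nodup : ((List.range 192).map (fun (n : Nat) => pvKey (n : Int))).Nodup := by
  decide

lemma pv_slot_keys : pvSlot.keys = (List.range 192).map (fun (n : Nat) => pvKey (n : Int)) := by
  have : pvSlot.keys = pvSlot.items.map (·.1) := rfl
  rw [this, pv_slot_items, List.map_map]
  rfl

lemma pv_slot_hit (n : Nat) (hn : n < 192) : pvSlot.get? (pvKey (n : Int)) = some ((n : Int) + 1) := by
  apply PySem.Dict.get?_of_mem_items pvSlot
  · rw [pv_slot_items]
    exact List.mem_map_of_mem (List.mem_range.mpr hn)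
  · rw [pv_slot_keys]; exact pv_key_nodup

lemma pv_slot_mem {k : String} {j : Int} (h : pvSlot.get? k = some j) :
    ∃ n : Nat, n < 192 ∧ k = pvKey (n : Int) ∧ j = (n : Int) + 1 := by
  have hm := PySem.Dict.mem_items_of_get?_eq_some pvSlot h
  rw [pv_slot_items] at hm
  obtain ⟨n, hn, he⟩ := List.mem_map.mp hm
  obtain ⟨hk, hj⟩ := Prod.mk.injEq .. ▸ he
  exact ⟨n, List.mem_range.mp hn, hk.symm, hj.symm⟩

lemma pv_key_inj {m n : Nat} (hm : m < 192) (hn : n < 192) (h : pvKey (m : Int) = pvKey (n : Int)) : m = n := by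
  have h1 := pv_slot_hit m hm
  have h2 := pv_slot_hit n hn
  rw [← h, h1] at h2
  have := Option.some.inj h2
  omega

set_option maxRecDepth 100000 in
lemma pv_alt_eq (plate : List (List String)) (platename : String) :
    convertPlateIndex_alt plate platename = plate.foldl pvScat (pvRows0 platename) := by
  simp only [convertPlateIndex_alt]
  rw [PySem.List.foldl_prod_mk
    (f := fun (acc : List (List String)) (i : Int) =>
      acc ++ [[platename ++ (if PySem.Int.floordiv i 12 < 8 then "_1" else "_2"),
               PySem.List.pyGetD (["A","B","C","D","E","F","G","H","I","J","K","L","M","N","O","P"] : List String) (PySem.Int.mod (PySem.Int.floordiv i 12) 8) "" ++ PySem.Int.toStr (PySem.Int.mod i 12 + 1), " ", " "]])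
    (g := fun (d : PySem.Dict String Int) (i : Int) =>
      d.insert (PySem.List.pyGetD (["A","B","C","D","E","F","G","H","I","J","K","L","M","N","O","P"] : List String) (PySem.Int.floordiv i 12) "" ++ PySem.Int.toStr (PySem.Int.mod i 12 + 1)) (i + 1))]
  rw [show ((PySem.List.pyRange 0 192 1).foldl (fun (d : PySem.Dict String Int) (i : Int) =>
      d.insert (PySem.List.pyGetD (["A","B","C","D","E","F","G","H","I","J","K","L","M","N","O","P"] : List String) (PySem.Int.floordiv i 12) "" ++ PySem.Int.toStr (PySem.Int.mod i 12 + 1)) (i + 1)) PySem.Dict.empty) = pvSlot from rfl]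
  have h1 : (PySem.List.pyRange 0 192 1).foldl (fun (acc : List (List String)) (i : Int) =>
      acc ++ [[platename ++ (if PySem.Int.floordiv i 12 < 8 then "_1" else "_2"),
               PySem.List.pyGetD (["A","B","C","D","E","F","G","H","I","J","K","L","M","N","O","P"] : List String) (PySem.Int.mod (PySem.Int.floordiv i 12) 8) "" ++ PySem.Int.toStr (PySem.Int.mod i 12 + 1), " ", " "]])
      [["PLATE NAME","PLATE POSITION","OLIGO NAME","SEQUENCE"]] = pvRows0 platename := by
    rw [PySem.List.foldl_append_singleton_eq_map]
    rw [show (PySem.List.pyRange 0 192 1 : List Int) = (List.range 192).map (fun k : Nat => (k : Int)) from PySem.List.pyRange_zero_natCast 192]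
    rw [List.map_map]
    unfold pvRows0 pvDefRow pvHeader pvRows16
    simp only [List.cons_append, List.nil_append]
    congr 1
  rw [h1]
  rfl

lemma pv_lastwins (k : String) :
    ∀ (plate : List (List String)) (acc : String × String),
    plate.foldl (fun (os : String × String) e =>
        if PySem.List.pyGetD e 0 "" == k then
          (PySem.List.pyGetD e 1 "", PySem.List.pyGetD e 2 "")
        else os) acc
      = (pvLast k plate).elim acc
          (fun e => (PySem.List.pyGetD e 1 "", PySem.List.pyGetD e 2 "")) := by
  intro plate
  induction plate with
  | nil => intro acc; rfl
  | cons e t ih =>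
    intro acc
    simp only [List.foldl_cons]
    rw [ih]
    unfold pvLast
    by_cases h : (PySem.List.pyGetD e 0 "" == k) = true
    · rw [if_pos h]
      simp only [List.filter_cons, h, if_true, List.getLast?_cons]
      cases (t.filter (fun e => PySem.List.pyGetD e 0 "" == k)).getLast? <;> rfl
    · rw [if_neg h]
      simp [List.filter_cons, h]

lemma pv_scat_len (e : List String) (out : List (List String)) :
    (pvScat out e).length = out.length := by
  unfold pvScat
  cases pvSlot.get? (PySem.List.pyGetD e 0 "") <;> simp

lemma pv_scatter_zero (plate : List (List String)) :
    ∀ out : List (List String), (plate.foldl pvScat out)[0]? = out[0]? := by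
  induction plate with
  | nil => intro out; rfl
  | cons e t ih =>
    intro out
    simp only [List.foldl_cons]
    rw [ih]
    unfold pvScat
    cases hg : pvSlot.get? (PySem.List.pyGetD e 0 "") with
    | none => rfl
    | some j =>
      dsimp only
      obtain ⟨m, hm, hk, hj⟩ := pv_slot_mem hg
      have hjt : j.toNat = m + 1 := by omega
      rw [hjt, List.getElem?_set_ne (by omega)]

lemma pv_scatter_get (n : Nat) (hn : n < 192) :
    ∀ (plate : List (List String)) (out : List (List String)), out.length = 193 →
    (∀ r ∈ out, 2 ≤ r.length) →
    (plate.foldl pvScat out)[n + 1]?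
      = (pvLast (pvKey (n : Int)) plate).elim (out[n + 1]?)
          (fun e => (out[n + 1]?).map (fun r =>
            r.take 2 ++ [PySem.List.pyGetD e 1 "", PySem.List.pyGetD e 2 ""])) := by
  intro plate
  induction plate with
  | nil => intro out _ _; rfl
  | cons e t ih =>
    intro out hlen hrows
    simp only [List.foldl_cons]
    unfold pvLast
    cases hg : pvSlot.get? (PySem.List.pyGetD e 0 "") with
    | none =>
      have hscat : pvScat out e = out := by unfold pvScat; rw [hg]
      have hne : (PySem.List.pyGetD e 0 "" == pvKey (n : Int)) = false := by
        by_contra hc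
        have heq : PySem.List.pyGetD e 0 "" = pvKey (n : Int) := by
          have := Bool.not_eq_false _ ▸ hc
          exact beq_iff_eq.mp (by simpa using this)
        rw [heq, pv_slot_hit n hn] at hg
        simp at hg
      rw [hscat]
      rw [show List.filter (fun e => PySem.List.pyGetD e 0 "" == pvKey (n : Int)) (e :: t)
            = List.filter (fun e => PySem.List.pyGetD e 0 "" == pvKey (n : Int)) t from by
          simp [hne]]
      exact ih out hlen hrows
    | some j =>
      obtain ⟨m, hm, hk, hj⟩ := pv_slot_mem hg
      have hjt : j.toNat = m + 1 := by omega
      have hjc : j = ((m + 1 : Nat) : Int) := by omega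
      set r0 : List String := PySem.List.pyGetD out j [] with hr0
      have hr0v : out[m + 1]? = some r0 := by
        rw [hr0, hjc, PySem.List.pyGetD_natCast, List.getD_eq_getElem?_getD]
        have : m + 1 < out.length := by omega
        simp [List.getElem?_eq_getElem this]
      set row' : List String := PySem.List.slice r0 none (some 2) ++
        [PySem.List.pyGetD e 1 "", PySem.List.pyGetD e 2 ""] with hrow'
      have hscat : pvScat out e = out.set j.toNat row' := by unfold pvScat; rw [hg]
      have hrow'2 : row' = r0.take 2 ++ [PySem.List.pyGetD e 1 "", PySem.List.pyGetD e 2 ""] := by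
        rw [hrow']
        rw [show (2 : Int) = ((2 : Nat) : Int) from rfl, PySem.List.slice_to_natCast]
      have hlen' : (out.set j.toNat row').length = 193 := by simp [hlen]
      have hrows' : ∀ r ∈ out.set j.toNat row', 2 ≤ r.length := by
        intro r hr
        rcases List.mem_or_eq_of_mem_set hr with h' | h'
        · exact hrows r h'
        · subst h'; rw [hrow'2]; simp
      have ih' := ih (out.set j.toNat row') hlen' hrows'
      rw [hscat, ih']
      by_cases hmn : m = n
      · subst hmn
        have hkey : (PySem.List.pyGetD e 0 "" == pvKey (m : Int)) = true := by
          rw [hk]; exact beq_self_eq_true _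
        rw [show List.filter (fun e => PySem.List.pyGetD e 0 "" == pvKey (m : Int)) (e :: t)
              = e :: List.filter (fun e => PySem.List.pyGetD e 0 "" == pvKey (m : Int)) t from by
            simp [hkey]]
        rw [List.getLast?_cons]
        have hset : (out.set j.toNat row')[m + 1]? = some row' := by
          rw [hjt]
          exact List.getElem?_set_self (by omega)
        have h2r0 : 2 ≤ r0.length := hrows r0 (List.mem_of_getElem? hr0v)
        have htk : row'.take 2 = r0.take 2 := by
          rw [hrow'2, List.take_append_of_le_length (by simp [List.length_take]; omega),
              List.take_take]
          norm_num
        cases hlast : (t.filter (fun e => PySem.List.pyGetD e 0 "" == pvKey (m : Int))).getLast? with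
        | none =>
          unfold pvLast
          rw [hlast]
          dsimp only [Option.elim, Option.getD]
          rw [hset, hr0v, hrow'2]
          rfl
        | some e' =>
          unfold pvLast
          rw [hlast]
          dsimp only [Option.elim, Option.getD]
          rw [hset, hr0v]
          simp only [Option.map_some]
          rw [htk]
      · have hne : (PySem.List.pyGetD e 0 "" == pvKey (n : Int)) = false := by
          by_contra hc
          have heq : PySem.List.pyGetD e 0 "" = pvKey (n : Int) := by
            have := Bool.not_eq_false _ ▸ hc
            exact beq_iff_eq.mp (by simpa using this)
          rw [hk] at heq
          exact hmn (pv_key_inj hm hn heq)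
        rw [show List.filter (fun e => PySem.List.pyGetD e 0 "" == pvKey (n : Int)) (e :: t)
              = List.filter (fun e => PySem.List.pyGetD e 0 "" == pvKey (n : Int)) t from by
            simp [hne]]
        have hset : (out.set j.toNat row')[n + 1]? = out[n + 1]? := by
          rw [hjt]
          exact List.getElem?_set_ne (by omega)
        rw [hset]
        rfl

set_option maxRecDepth 8192 in
lemma pv_cell : ∀ r : Nat, r < 16 → ∀ c : Nat, c < 12 →
    PySem.List.pyGetD (["A","B","C","D","E","F","G","H","A","B","C","D","E","F","G","H"] : List String) (r : Int) ""
      = PySem.List.pyGetD pvRows16 ((r % 8 : Nat) : Int) ""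
    ∧ PySem.List.pyGetD ([1,2,3,4,5,6,7,8,9,10,11,12] : List Int) (c : Int) 0 = (c : Int) + 1
    ∧ PySem.List.pyGetD (["A","B","C","D","E","F","G","H","I","J","K","L","M","N","O","P"] : List String) (r : Int) ""
        ++ PySem.Int.toStr (PySem.List.pyGetD ([1,2,3,4,5,6,7,8,9,10,11,12] : List Int) (c : Int) 0)
      = pvKey ((r * 12 + c : Nat) : Int) := by
  decide

lemma pv_flat (f : Int → Int → List String) :
    (PySem.List.pyRange 0 16 1).flatMap (fun r => (PySem.List.pyRange 0 12 1).map (fun c => f r c))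
      = (List.range 192).map (fun n => f ((n / 12 : Nat) : Int) ((n % 12 : Nat) : Int)) := by
  rfl

lemma pv_a_eq (plate : List (List String)) (platename : String) :
    convertPlateIndex plate platename
      = pvHeader :: (List.range 192).map (fun n =>
          [platename ++ (if (n / 12 : Nat) < 8 then "_1" else "_2"),
           PySem.List.pyGetD pvRows16 (((n / 12) % 8 : Nat) : Int) "" ++ PySem.Int.toStr (((n % 12 : Nat) : Int) + 1),
           (pvOS (pvKey (n : Int)) plate).1, (pvOS (pvKey (n : Int)) plate).2]) := by
  simp only [convertPlateIndex]
  simp only [PySem.List.foldl_append_singleton_eq_map, PySem.List.foldl_append_eq_flatMap]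
  rw [show PySem.List.len (["A","B","C","D","E","F","G","H","A","B","C","D","E","F","G","H"] : List String) = (16 : Int) from rfl]
  rw [show PySem.List.len ([1,2,3,4,5,6,7,8,9,10,11,12] : List Int) = (12 : Int) from rfl]
  rw [pv_flat (f := fun row col =>
      [if row < 8 then platename ++ "_1" else platename ++ "_2",
       PySem.List.pyGetD (["A","B","C","D","E","F","G","H","A","B","C","D","E","F","G","H"] : List String) row ""
         ++ PySem.Int.toStr (PySem.List.pyGetD ([1,2,3,4,5,6,7,8,9,10,11,12] : List Int) col 0),
       ((PySem.List.pyRange 0 (PySem.List.len plate) 1).foldl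
         (fun (os : String × String) i =>
           if PySem.List.pyGetD (PySem.List.pyGetD plate i []) 0 ""
               == PySem.List.pyGetD (["A","B","C","D","E","F","G","H","I","J","K","L","M","N","O","P"] : List String) row ""
                 ++ PySem.Int.toStr (PySem.List.pyGetD ([1,2,3,4,5,6,7,8,9,10,11,12] : List Int) col 0) then
             (PySem.List.pyGetD (PySem.List.pyGetD plate i []) 1 "",
              PySem.List.pyGetD (PySem.List.pyGetD plate i []) 2 "")
           else os) (" ", " ")).1,
       ((PySem.List.pyRange 0 (PySem.List.len plate) 1).foldl
         (fun (os : String × String) i =>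
           if PySem.List.pyGetD (PySem.List.pyGetD plate i []) 0 ""
               == PySem.List.pyGetD (["A","B","C","D","E","F","G","H","I","J","K","L","M","N","O","P"] : List String) row ""
                 ++ PySem.Int.toStr (PySem.List.pyGetD ([1,2,3,4,5,6,7,8,9,10,11,12] : List Int) col 0) then
             (PySem.List.pyGetD (PySem.List.pyGetD plate i []) 1 "",
              PySem.List.pyGetD (PySem.List.pyGetD plate i []) 2 "")
           else os) (" ", " ")).2])]
  rw [List.singleton_append]
  congr 1
  apply List.map_congr_left
  intro n hn
  have hn192 : n < 192 := List.mem_range.mp hn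
  have hr : n / 12 < 16 := by omega
  have hc : n % 12 < 12 := by omega
  obtain ⟨h1, h2, h3⟩ := pv_cell (n / 12) hr (n % 12) hc
  have hrec : n / 12 * 12 + n % 12 = n := by omega
  rw [hrec] at h3
  have hfold : ((PySem.List.pyRange 0 (PySem.List.len plate) 1).foldl
      (fun (os : String × String) i =>
        if PySem.List.pyGetD (PySem.List.pyGetD plate i []) 0 ""
            == PySem.List.pyGetD (["A","B","C","D","E","F","G","H","I","J","K","L","M","N","O","P"] : List String) ((n / 12 : Nat) : Int) ""
              ++ PySem.Int.toStr (PySem.List.pyGetD ([1,2,3,4,5,6,7,8,9,10,11,12] : List Int) ((n % 12 : Nat) : Int) 0) then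
          (PySem.List.pyGetD (PySem.List.pyGetD plate i []) 1 "",
           PySem.List.pyGetD (PySem.List.pyGetD plate i []) 2 "")
        else os) (" ", " ")) = pvOS (pvKey (n : Int)) plate := by
    rw [show (PySem.List.pyGetD (["A","B","C","D","E","F","G","H","I","J","K","L","M","N","O","P"] : List String) ((n / 12 : Nat) : Int) ""
          ++ PySem.Int.toStr (PySem.List.pyGetD ([1,2,3,4,5,6,7,8,9,10,11,12] : List Int) ((n % 12 : Nat) : Int) 0)) = pvKey (n : Int) from h3]
    rw [PySem.List.foldl_pyRange_zero_pyGetD plate []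
      (fun (os : String × String) e =>
        if PySem.List.pyGetD e 0 "" == pvKey (n : Int) then
          (PySem.List.pyGetD e 1 "", PySem.List.pyGetD e 2 "")
        else os) (" ", " ")]
    rw [pv_lastwins]
    rfl
  rw [hfold, h1, h2]
  have hif : (if ((n / 12 : Nat) : Int) < 8 then platename ++ "_1" else platename ++ "_2")
      = platename ++ (if (n / 12 : Nat) < 8 then "_1" else "_2") := by
    by_cases h : (n / 12 : Nat) < 8
    · rw [if_pos h, if_pos (by exact_mod_cast h)]
    · rw [if_neg h, if_neg (by omega)]
  rw [hif]

-- ===== VERDICT (by name: the statement is the Claim_ definition above) =====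
theorem convertPlateIndex_spec : Claim_equal_convertPlateIndex := by
  intro plate platename hdom hpre
  unfold Spec_convertPlateIndex
  rw [pv_a_eq, pv_alt_eq]
  have hlen : (plate.foldl pvScat (pvRows0 platename)).length = 193 := by
    have : ∀ (l : List (List String)) (out : List (List String)),
        (l.foldl pvScat out).length = out.length := by
      intro l
      induction l with
      | nil => intro out; rfl
      | cons e t ih => intro out; simp only [List.foldl_cons]; rw [ih, pv_scat_len]
    rw [this]
    simp [pvRows0]
  have hrows0 : ∀ r ∈ pvRows0 platename, 2 ≤ r.length := by
    intro r hr
    rcases List.mem_cons.mp hr with h | h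
    · subst h; simp [pvHeader]
    · obtain ⟨n, _, rfl⟩ := List.mem_map.mp h
      simp [pvDefRow]
  have hlen0 : (pvRows0 platename).length = 193 := by simp [pvRows0]
  apply List.ext_getElem?
  intro i
  cases i with
  | zero =>
    rw [pv_scatter_zero]
    rfl
  | succ n =>
    by_cases hn : n < 192
    · rw [pv_scatter_get n hn plate (pvRows0 platename) hlen0 hrows0]
      have hdef : (pvRows0 platename)[n + 1]? = some (pvDefRow platename n) := by
        simp [pvRows0, List.getElem?_map, hn]
      have hlhs : (pvHeader :: (List.range 192).map (fun n =>
          [platename ++ (if (n / 12 : Nat) < 8 then "_1" else "_2"),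
           PySem.List.pyGetD pvRows16 (((n / 12) % 8 : Nat) : Int) "" ++ PySem.Int.toStr (((n % 12 : Nat) : Int) + 1),
           (pvOS (pvKey (n : Int)) plate).1, (pvOS (pvKey (n : Int)) plate).2]))[n + 1]?
          = some [platename ++ (if (n / 12 : Nat) < 8 then "_1" else "_2"),
           PySem.List.pyGetD pvRows16 (((n / 12) % 8 : Nat) : Int) "" ++ PySem.Int.toStr (((n % 12 : Nat) : Int) + 1),
           (pvOS (pvKey (n : Int)) plate).1, (pvOS (pvKey (n : Int)) plate).2] := by
        simp [hn]
      rw [hlhs, hdef]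
      unfold pvOS
      cases (pvLast (pvKey (n : Int)) plate) with
      | none => rfl
      | some e => rfl
    · have h1 : 193 ≤ n + 1 := by omega
      rw [List.getElem?_eq_none (by simpa using h1),
          List.getElem?_eq_none (by rw [hlen]; omega)]
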